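-- pv_equiv track=rewrite | github.com/huangweijing/weo_leetcode | 2840_Check_if_Strings_Can_be_Made_Equal_With_Operations_II.py | checkStrings
-- ===== SOURCE A (Python) =====
-- from collections import Counter
--
-- def checkStrings(s1: str, s2: str) -> bool:
--     s1_cnt_odd = Counter()
--     s1_cnt_eve = Counter()
--     s2_cnt_odd = Counter()
--     s2_cnt_eve = Counter()
--     for i, ch in enumerate(s1):
--         if i & 1 == 1:
--             s1_cnt_odd[ch] += 1
--         else:
--             s1_cnt_eve[ch] += 1
--
--     for i, ch in enumerate(s2):
--         if i & 1 == 1: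
--             s2_cnt_odd[ch] += 1
--         else:
--             s2_cnt_eve[ch] += 1
--
--     return s1_cnt_odd == s2_cnt_odd and s1_cnt_eve == s2_cnt_eve
-- ===== SOURCE B (Python) =====
-- def checkStrings(s1: str, s2: str) -> bool:
--     return sorted(s1[::2]) == sorted(s2[::2]) and sorted(s1[1::2]) == sorted(s2[1::2])
-- ===== Notes on version B (the rewrite author's own statement) =====
-- stated objective: simpler
-- what changed: Replaces the four Counters and two parity-branching Python-level loops with slicing out the even/odd-indexed characters and comparing their sorted lists (multiset equality by sorting instead of frequency histograms); the slicing and sorting run in C, removing the per-character interpreted loop.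
import Mathlib
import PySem

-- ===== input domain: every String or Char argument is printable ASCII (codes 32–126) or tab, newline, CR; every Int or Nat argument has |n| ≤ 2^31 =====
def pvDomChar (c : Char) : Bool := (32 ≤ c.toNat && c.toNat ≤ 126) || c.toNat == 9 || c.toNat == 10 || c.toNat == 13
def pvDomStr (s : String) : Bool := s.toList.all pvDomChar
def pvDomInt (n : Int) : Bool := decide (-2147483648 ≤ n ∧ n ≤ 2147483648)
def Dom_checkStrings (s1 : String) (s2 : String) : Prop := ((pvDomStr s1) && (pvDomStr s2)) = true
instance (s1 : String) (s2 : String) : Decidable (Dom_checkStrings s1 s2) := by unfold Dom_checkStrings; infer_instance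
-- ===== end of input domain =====

-- B replaces A's four Counters and parity-branching loops by comparing the sorted even/odd slices (simpler; same return value).

-- ===== PORT A =====
-- Python dict/Counter '==': same number of keys and every key of d1 has the same value in d2 (order-insensitive).
def pyDictEq (d1 d2 : PySem.Dict Char Int) : Bool :=
  d1.size == d2.size && d1.keys.all (fun k => d1.get? k == d2.get? k)

-- the loop body: 'if i & 1 == 1: odd[ch] += 1 else: eve[ch] += 1' (i & 1 == 1 is i % 2 == 1 for the nonnegative enumerate indices)
def pvStep (p : PySem.Dict Char Int × PySem.Dict Char Int) (ic : Int × Char) :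
    PySem.Dict Char Int × PySem.Dict Char Int :=
  if ic.1 % 2 == 1 then (p.1.modify ic.2 0 (· + 1), p.2) else (p.1, p.2.modify ic.2 0 (· + 1))

def checkStrings (s1 : String) (s2 : String) : Bool :=
  let p1 := (PySem.List.enumerate s1.toList).foldl pvStep (PySem.Dict.empty, PySem.Dict.empty)
  let p2 := (PySem.List.enumerate s2.toList).foldl pvStep (PySem.Dict.empty, PySem.Dict.empty)
  pyDictEq p1.1 p2.1 && pyDictEq p1.2 p2.2

-- ===== PORT B =====
-- return sorted(s1[::2]) == sorted(s2[::2]) and sorted(s1[1::2]) == sorted(s2[1::2])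
def checkStrings_alt (s1 : String) (s2 : String) : Bool :=
  decide (PySem.List.sorted ((PySem.List.slice? s1.toList none none 2).getD []) (fun c => c) false
        = PySem.List.sorted ((PySem.List.slice? s2.toList none none 2).getD []) (fun c => c) false)
  && decide (PySem.List.sorted ((PySem.List.slice? s1.toList (some 1) none 2).getD []) (fun c => c) false
        = PySem.List.sorted ((PySem.List.slice? s2.toList (some 1) none 2).getD []) (fun c => c) false)

-- ===== PRECONDITION & SPEC =====
def Spec_checkStrings (s1 : String) (s2 : String) (out : Bool) : Prop := out = checkStrings_alt s1 s2
instance (s1 : String) (s2 : String) (out : Bool) : Decidable (Spec_checkStrings s1 s2 out) := by unfold Spec_checkStrings; infer_instance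

-- ===== CLAIM (what is proved, stated in full; the proofs are below) =====
def Claim_equal_checkStrings : Prop := ∀ (s1 : String) (s2 : String), Dom_checkStrings s1 s2 → Spec_checkStrings s1 s2 (checkStrings s1 s2)

-- ===== LEMMAS AND PROOFS =====

-- the characters of xs at even / odd positions
def takeEven : List Char → List Char
  | [] => []
  | [x] => [x]
  | x :: _ :: xs => x :: takeEven xs

def takeOdd (xs : List Char) : List Char := takeEven xs.tail

lemma takeEven_cons (x : Char) (t : List Char) : takeEven (x :: t) = x :: takeOdd t := by
  cases t <;> rfl

lemma takeOdd_cons (x : Char) (t : List Char) : takeOdd (x :: t) = takeEven t := rfl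

-- s[::2] and s[1::2] are exactly the even- / odd-position characters
lemma filterMap_even (xs : List Char) :
    List.filterMap (fun k : Nat => xs[2 * k]?) (List.range ((xs.length + 1) / 2)) = takeEven xs := by
  induction xs using takeEven.induct with
  | case1 => rfl
  | case2 x => simp [takeEven, List.range_one]
  | case3 x y t ih =>
    have hlen : ((x :: y :: t).length + 1) / 2 = (t.length + 1) / 2 + 1 := by
      simp [List.length_cons]; omega
    rw [hlen, List.range_succ_eq_map, List.filterMap_cons, List.filterMap_map]
    have h0 : (x :: y :: t)[2 * 0]? = some x := rfl
    rw [h0]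
    have hf : ((fun k : Nat => (x :: y :: t)[2 * k]?) ∘ Nat.succ) = fun k : Nat => t[2 * k]? := by
      funext k
      show (x :: y :: t)[2 * (k + 1)]? = t[2 * k]?
      have : 2 * (k + 1) = 2 * k + 1 + 1 := by omega
      rw [this]
      rfl
    rw [hf, ih, takeEven_cons, takeOdd_cons]

lemma slice_even (xs : List Char) :
    PySem.List.slice? xs none none 2 = some (takeEven xs) := by
  simp only [PySem.List.slice?, PySem.List.sliceIndices]
  norm_num
  have hr : (if 0 < xs.length then (((xs.length : Int) + 2 - 1) / 2).toNat else 0)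
      = (xs.length + 1) / 2 := by
    rcases Nat.eq_zero_or_pos xs.length with h | h
    · simp [h]
    · rw [if_pos h]; omega
  rw [hr, ← filterMap_even xs]
  apply List.filterMap_congr
  intro k _
  have h2 : ((2 : Int) * (k : Int)).toNat = 2 * k := by omega
  rw [h2]

lemma slice_odd (xs : List Char) :
    PySem.List.slice? xs (some 1) none 2 = some (takeOdd xs) := by
  cases xs with
  | nil => rfl
  | cons x t =>
    simp only [PySem.List.slice?, PySem.List.sliceIndices]
    norm_num
    have hr : (if 0 < t.length then (((t.length : Int) + 2 - 1) / 2).toNat else 0)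
        = (t.length + 1) / 2 := by
      rcases Nat.eq_zero_or_pos t.length with h | h
      · simp [h]
      · rw [if_pos h]; omega
    rw [hr, takeOdd_cons, ← filterMap_even t]
    apply List.filterMap_congr
    intro k _
    have h2 : ((1 : Int) + 2 * (k : Int)).toNat = 2 * k + 1 := by omega
    rw [h2, List.getElem?_cons_succ]

-- the A-side double-counter loop builds exactly the counters of the two parity subsequences
lemma foldl_pvStep (cs : List Char) : ∀ (n : Int) (o e : PySem.Dict Char Int),
    (PySem.List.enumerate cs n).foldl pvStep (o, e) =
      if n % 2 == 1 then
        (List.foldl (fun d x => d.modify x 0 (· + 1)) o (takeEven cs),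
         List.foldl (fun d x => d.modify x 0 (· + 1)) e (takeOdd cs))
      else
        (List.foldl (fun d x => d.modify x 0 (· + 1)) o (takeOdd cs),
         List.foldl (fun d x => d.modify x 0 (· + 1)) e (takeEven cs)) := by
  induction cs with
  | nil => intro n o e; simp [PySem.List.enumerate, takeEven, takeOdd]
  | cons x t ih =>
    intro n o e
    have henum : PySem.List.enumerate (x :: t) n = (n, x) :: PySem.List.enumerate t (n + 1) := rfl
    rw [henum, List.foldl_cons]
    by_cases hn : n % 2 = 1
    · have hstep : pvStep (o, e) (n, x) = (o.modify x 0 (· + 1), e) := by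
        simp [pvStep, hn]
      have hn1 : (n + 1) % 2 = 0 := by omega
      rw [hstep, ih (n + 1), if_neg (by simp [hn1]), if_pos (by simp [hn]),
        takeEven_cons, takeOdd_cons, List.foldl_cons]
    · have h0 : n % 2 = 0 := by omega
      have hstep : pvStep (o, e) (n, x) = (o, e.modify x 0 (· + 1)) := by
        simp [pvStep, h0]
      have hn1 : (n + 1) % 2 = 1 := by omega
      rw [hstep, ih (n + 1), if_pos (by simp [hn1]), if_neg (by simp [h0]),
        takeEven_cons, takeOdd_cons, List.foldl_cons]

lemma get?_counter (l : List Char) (k : Char) :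
    (PySem.Dict.counter l).get? k = if k ∈ l then some ((l.count k : Int)) else none := by
  by_cases h : k ∈ l
  · rw [if_pos h]
    rw [PySem.Dict.get?_eq_some_iff_mem_items _ _ _ (PySem.Dict.nodup_keys_counter l),
      PySem.Dict.items_counter]
    exact List.mem_map.mpr ⟨k, (PySem.Set.mem_ofList l k).mpr h, rfl⟩
  · rw [if_neg h, PySem.Dict.get?_eq_none_iff_not_mem_keys, PySem.Dict.keys_counter]
    intro hk
    exact h ((PySem.Set.mem_ofList l k).mp hk)

lemma size_counter (l : List Char) :
    (PySem.Dict.counter l).size = (PySem.Set.ofList l).length := by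
  simp [PySem.Dict.size, PySem.Dict.items_counter]

lemma pyDictEq_counter_iff (l1 l2 : List Char) :
    pyDictEq (PySem.Dict.counter l1) (PySem.Dict.counter l2) = true ↔ l1.Perm l2 := by
  constructor
  · intro h
    simp only [pyDictEq, Bool.and_eq_true, beq_iff_eq, List.all_eq_true] at h
    obtain ⟨hsize, hall⟩ := h
    have hget : ∀ k ∈ l1, (PySem.Dict.counter l1).get? k = (PySem.Dict.counter l2).get? k := by
      intro k hk
      have hkk : k ∈ (PySem.Dict.counter l1).keys := by
        rw [PySem.Dict.keys_counter]; exact (PySem.Set.mem_ofList l1 k).mpr hk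
      simpa using hall k hkk
    have hsub : ∀ k ∈ l1, k ∈ l2 := by
      intro k hk
      have := hget k hk
      rw [get?_counter, get?_counter, if_pos hk] at this
      by_contra hk2
      rw [if_neg hk2] at this
      exact (by simp at this)
    have hmem : ∀ k, k ∈ l1 ↔ k ∈ l2 := by
      intro k
      constructor
      · exact hsub k
      · intro hk2
        have hfs : (PySem.Set.ofList l1).toFinset ⊆ (PySem.Set.ofList l2).toFinset := by
          intro a ha
          simp only [List.mem_toFinset, PySem.Set.mem_ofList] at ha ⊢
          exact hsub a ha
        have hc1 : (PySem.Set.ofList l1).toFinset.card = (PySem.Set.ofList l1).length :=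
          List.toFinset_card_of_nodup (PySem.Set.nodup_ofList l1)
        have hc2 : (PySem.Set.ofList l2).toFinset.card = (PySem.Set.ofList l2).length :=
          List.toFinset_card_of_nodup (PySem.Set.nodup_ofList l2)
        have hsz : (PySem.Set.ofList l1).length = (PySem.Set.ofList l2).length := by
          rw [← size_counter, ← size_counter]; exact hsize
        have heq : (PySem.Set.ofList l1).toFinset = (PySem.Set.ofList l2).toFinset :=
          Finset.eq_of_subset_of_card_le hfs (by omega)
        have : k ∈ (PySem.Set.ofList l1).toFinset := by
          rw [heq]
          simp only [List.mem_toFinset, PySem.Set.mem_ofList]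
          exact hk2
        simpa [PySem.Set.mem_ofList] using this
    rw [List.perm_iff_count]
    intro k
    by_cases hk : k ∈ l1
    · have := hget k hk
      rw [get?_counter, get?_counter, if_pos hk, if_pos ((hmem k).mp hk)] at this
      exact_mod_cast Option.some.inj this
    · have hk2 : k ∉ l2 := fun h2 => hk ((hmem k).mpr h2)
      rw [List.count_eq_zero.mpr hk, List.count_eq_zero.mpr hk2]
  · intro h
    simp only [pyDictEq, Bool.and_eq_true, beq_iff_eq, List.all_eq_true]
    have hmem : ∀ k, k ∈ l1 ↔ k ∈ l2 := fun k => h.mem_iff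
    constructor
    · rw [size_counter, size_counter]
      have : (PySem.Set.ofList l1).Perm (PySem.Set.ofList l2) := by
        rw [List.perm_ext_iff_of_nodup (PySem.Set.nodup_ofList l1) (PySem.Set.nodup_ofList l2)]
        intro a
        rw [PySem.Set.mem_ofList, PySem.Set.mem_ofList]
        exact hmem a
      exact this.length_eq
    · intro k hk
      have hk1 : k ∈ l1 := by
        rw [PySem.Dict.keys_counter] at hk
        exact (PySem.Set.mem_ofList l1 k).mp hk
      rw [get?_counter, get?_counter, if_pos hk1, if_pos ((hmem k).mp hk1), h.count_eq]

lemma pyDictEq_counter_eq (l1 l2 : List Char) :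
    pyDictEq (PySem.Dict.counter l1) (PySem.Dict.counter l2) = decide (l1.Perm l2) := by
  by_cases h : l1.Perm l2
  · rw [decide_eq_true h]
    exact (pyDictEq_counter_iff l1 l2).mpr h
  · rw [decide_eq_false h]
    rw [Bool.eq_false_iff]
    intro hc
    exact h ((pyDictEq_counter_iff l1 l2).mp hc)

-- ===== VERDICT (by name: the statement is the Claim_ definition above) =====
theorem checkStrings_spec : Claim_equal_checkStrings := by
  intro s1 s2 _
  show checkStrings s1 s2 = checkStrings_alt s1 s2
  unfold checkStrings checkStrings_alt
  rw [foldl_pvStep s1.toList 0, foldl_pvStep s2.toList 0]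
  rw [if_neg (by decide), if_neg (by decide)]
  rw [slice_even, slice_even, slice_odd, slice_odd]
  simp only [Option.getD_some]
  have hco : ∀ l : List Char,
      List.foldl (fun d x => d.modify x 0 (· + 1)) PySem.Dict.empty l = PySem.Dict.counter l :=
    fun l => rfl
  rw [hco, hco, hco, hco]
  rw [pyDictEq_counter_eq, pyDictEq_counter_eq]
  rw [decide_eq_decide.mpr (PySem.List.sorted_id_eq_sorted_id_iff_perm _ _),
    decide_eq_decide.mpr (PySem.List.sorted_id_eq_sorted_id_iff_perm _ _)]
  exact Bool.and_comm _ _
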